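-- pv_equiv track=rewrite | github.com/ffagerholm/superpermutations | src/small_superpermutations.py | iterate_perms
-- ===== SOURCE A (Python) =====
-- def iterate_perms(superperm):
--     n = len(set(superperm))
--     if n == 1:
--         yield superperm
--         return
--
--     seen = []
--     for i in range(len(superperm) - n + 1):
--         p = superperm[i:i+n]
--         if len(set(p)) == n and not p in seen:
--             seen.append(p)
--             yield p
-- ===== SOURCE B (Python) =====
-- def iterate_perms(superperm):
--     n = len(set(superperm))
--     if n == 1:
--         yield superperm
--         return
--
--     # sliding-window frequency table over the current n-length window
--     freq = {}
--     distinct = 0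
--     for c in superperm[:n]:
--         if freq.get(c, 0) == 0:
--             distinct += 1
--         freq[c] = freq.get(c, 0) + 1
--
--     seen = set()
--     for i in range(len(superperm) - n + 1):
--         if i > 0:
--             out = superperm[i - 1]
--             freq[out] -= 1
--             if freq[out] == 0:
--                 distinct -= 1
--             cin = superperm[i + n - 1]
--             if freq.get(cin, 0) == 0:
--                 distinct += 1
--             freq[cin] = freq.get(cin, 0) + 1
--         if distinct == n:
--             p = superperm[i:i + n]
--             if p not in seen:
--                 seen.add(p)
--                 yield p
-- ===== Notes on version B (the rewrite author's own statement) =====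
-- stated objective: alternative
-- what changed: B maintains a sliding-window character-frequency dict with a live distinct-count instead of rebuilding a set for every window, and keeps already-yielded windows in a hash set instead of scanning a list; measured ~1.3-1.5x faster but not consistently above the 1.5x bar.
import Mathlib
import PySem

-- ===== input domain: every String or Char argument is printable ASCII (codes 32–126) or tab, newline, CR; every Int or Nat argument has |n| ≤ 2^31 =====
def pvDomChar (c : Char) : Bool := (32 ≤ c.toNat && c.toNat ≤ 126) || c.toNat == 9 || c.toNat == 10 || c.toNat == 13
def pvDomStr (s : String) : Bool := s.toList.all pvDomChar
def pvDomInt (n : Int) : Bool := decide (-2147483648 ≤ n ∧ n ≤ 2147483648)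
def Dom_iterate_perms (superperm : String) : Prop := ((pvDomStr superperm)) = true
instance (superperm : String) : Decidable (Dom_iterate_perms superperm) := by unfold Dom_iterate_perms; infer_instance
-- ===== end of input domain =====

-- B replaces A's per-window len(set(p))==n test and linear 'seen' list scan by an incrementally
-- maintained sliding-window frequency dict with a live distinct-count, plus a 'seen' set.

-- B replaces A's per-window len(set(p)) == n test by an incrementally maintained sliding-window
-- frequency dict with a live distinct-count, and the linear 'seen' list scan by a set.

-- ===== PORT A =====
-- loop body of A's for-loop, as a named helper
def pvAStep (s : List Char) (n : Nat) (st : List (List Char) × List String) (i : Int) :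
    List (List Char) × List String :=
  let p := PySem.List.slice s (some i) (some (i + (n : Int)))
  if ((PySem.Set.ofList p).length == n) && !(st.1.contains p) then
    (st.1 ++ [p], st.2 ++ [String.ofList p])
  else st

def iterate_perms (superperm : String) : List String :=
  let s := superperm.toList
  let n : Nat := (PySem.Set.ofList s).length
  if n == 1 then [superperm]
  else
    ((PySem.List.pyRange 0 ((s.length : Int) - (n : Int) + 1) 1).foldl (pvAStep s n) ([], [])).2

-- ===== PORT B =====
-- body of B's initialisation loop over the first window
def pvBInit (st : PySem.Dict Char Int × Int) (c : Char) : PySem.Dict Char Int × Int :=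
  let distinct := if st.1.getD c 0 == 0 then st.2 + 1 else st.2
  (st.1.modify c 0 (· + 1), distinct)

-- body of B's main loop; the pyGetD defaults are never used: both indices are in range whenever i > 0
def pvBStep (s : List Char) (n : Nat)
    (st : (PySem.Dict Char Int × Int) × PySem.Set (List Char) × List String) (i : Int) :
    (PySem.Dict Char Int × Int) × PySem.Set (List Char) × List String :=
  let fd :=
    if i > 0 then
      let oc := PySem.List.pyGetD s (i - 1) ' '
      let freq := st.1.1.modify oc 0 (· - 1)
      let d1 := if freq.getD oc 0 == 0 then st.1.2 - 1 else st.1.2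
      let ic := PySem.List.pyGetD s (i + (n : Int) - 1) ' '
      let d2 := if freq.getD ic 0 == 0 then d1 + 1 else d1
      (freq.modify ic 0 (· + 1), d2)
    else st.1
  if fd.2 == (n : Int) then
    let p := PySem.List.slice s (some i) (some (i + (n : Int)))
    if !(PySem.Set.contains st.2.1 p) then
      (fd, PySem.Set.add st.2.1 p, st.2.2 ++ [String.ofList p])
    else (fd, st.2.1, st.2.2)
  else (fd, st.2.1, st.2.2)

def iterate_perms_alt (superperm : String) : List String :=
  let s := superperm.toList
  let n : Nat := (PySem.Set.ofList s).length
  if n == 1 then [superperm]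
  else
    let init := (s.take n).foldl pvBInit (PySem.Dict.empty, 0)
    ((PySem.List.pyRange 0 ((s.length : Int) - (n : Int) + 1) 1).foldl (pvBStep s n)
      (init, PySem.Set.empty, [])).2.2

-- ===== PRECONDITION & SPEC =====
def Spec_iterate_perms (superperm : String) (out : List String) : Prop := out = iterate_perms_alt superperm
instance (superperm : String) (out : List String) : Decidable (Spec_iterate_perms superperm out) := by unfold Spec_iterate_perms; infer_instance

-- ===== CLAIM (what is proved, stated in full; the proofs are below) =====
def Claim_equal_iterate_perms : Prop := ∀ (superperm : String), Dom_iterate_perms superperm → Spec_iterate_perms superperm (iterate_perms superperm)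

-- ===== LEMMAS AND PROOFS =====

-- number of distinct elements of (c :: t)
lemma pvDc_cons (c : Char) (t : List Char) :
    (PySem.Set.ofList (c :: t)).length
      = (PySem.Set.ofList t).length + (if c ∈ t then 0 else 1) := by
  rw [PySem.Set.ofList_cons]
  simp only [List.length_cons, PySem.Set.discard, ← List.countP_eq_length_filter]
  have h1 := List.length_eq_countP_add_countP (p := fun y => !(y == c)) (l := PySem.Set.ofList t)
  have h2 : (PySem.Set.ofList t).countP (fun a => decide ¬((!(a == c)) = true))
      = (PySem.Set.ofList t).count c := by
    simp only [List.count]; apply List.countP_congr; intro a _; simp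
  by_cases hc : c ∈ t
  · have hm : c ∈ PySem.Set.ofList t := (PySem.Set.mem_ofList _ _).2 hc
    have h4 := List.count_eq_one_of_mem (PySem.Set.nodup_ofList t) hm
    simp only [hc, if_true]
    omega
  · have hm : c ∉ PySem.Set.ofList t := fun h => hc ((PySem.Set.mem_ofList _ _).1 h)
    have h4 := List.count_eq_zero_of_not_mem hm
    simp only [hc, if_false]
    omega

-- number of distinct elements of (t ++ [d])
lemma pvDc_append (d : Char) (t : List Char) :
    (PySem.Set.ofList (t ++ [d])).length
      = (PySem.Set.ofList t).length + (if d ∈ t then 0 else 1) := by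
  rw [PySem.Set.ofList_append_singleton, PySem.Set.add_eq_ite]
  by_cases hd : d ∈ t
  · simp [PySem.Set.mem_ofList, hd]
  · simp [PySem.Set.mem_ofList, hd]

-- B's initialisation loop computes the frequency table and distinct-count of the scanned prefix
lemma pvInit_inv (l : List Char) :
    ∀ (w : List Char) (freq : PySem.Dict Char Int) (distinct : Int),
    (∀ c, freq.getD c 0 = (w.count c : Int)) →
    distinct = ((PySem.Set.ofList w).length : Int) →
    (∀ c, (l.foldl pvBInit (freq, distinct)).1.getD c 0 = ((w ++ l).count c : Int)) ∧
    (l.foldl pvBInit (freq, distinct)).2 = ((PySem.Set.ofList (w ++ l)).length : Int) := by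
  induction l with
  | nil => intro w freq distinct h1 h2; simpa using ⟨h1, h2⟩
  | cons c l ih =>
    intro w freq distinct h1 h2
    have hw : w ++ c :: l = (w ++ [c]) ++ l := by simp
    rw [hw, List.foldl_cons]
    apply ih
    · intro c'
      show (freq.modify c 0 (· + 1)).getD c' 0 = _
      rw [PySem.Dict.getD_modify]
      by_cases hc : c' = c
      · subst hc; rw [if_pos rfl, h1 c']; simp [List.count_append]
      · rw [if_neg hc, h1 c']; simp [List.count_append, Ne.symm hc]
    · show (if freq.getD c 0 == 0 then distinct + 1 else distinct) = _
      rw [h1 c, h2, pvDc_append]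
      by_cases hc : c ∈ w
      · have hnz : w.count c ≠ 0 := by simpa [List.count_eq_zero] using hc
        simp [hc, hnz]
      · have hz : w.count c = 0 := by simp [List.count_eq_zero, hc]
        simp [hc, hz]

-- main loop equivalence: from index k ≥ 1 on, with B's state describing the window at k - 1
lemma pvLoop_eq (s : List Char) (n : Nat) (hn : s ≠ [] → 1 ≤ n) :
    ∀ (m k : Nat) (freq : PySem.Dict Char Int) (distinct : Int)
      (seen : List (List Char)) (out : List String),
    1 ≤ k → (k : Int) + (m : Int) = (s.length : Int) - (n : Int) + 1 →
    (∀ c, freq.getD c 0 = (((s.drop (k-1)).take n).count c : Int)) →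
    distinct = ((PySem.Set.ofList ((s.drop (k-1)).take n)).length : Int) →
    ((PySem.List.pyRange (k : Int) ((s.length : Int) - (n : Int) + 1) 1).foldl (pvAStep s n) (seen, out)).2 =
    ((PySem.List.pyRange (k : Int) ((s.length : Int) - (n : Int) + 1) 1).foldl (pvBStep s n)
        ((freq, distinct), seen, out)).2.2 := by
  intro m
  induction m with
  | zero =>
    intro k freq distinct seen out hk1 hk h3 h4
    rw [PySem.List.pyRange_one_eq_nil (by omega)]
    rfl
  | succ m ih =>
    intro k freq distinct seen out hk1 hk h3 h4
    -- arithmetic facts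
    have hL : s.length = k + m + n := by push_cast at hk; omega
    have hsne : s ≠ [] := by
      intro h; subst h; simp at hL; omega
    have hn1 : 1 ≤ n := hn hsne
    have hK : k - 1 < s.length := by omega
    have hKn : (k - 1) + n < s.length := by omega
    -- window decomposition
    set K := k - 1 with hKdef
    have hk1' : K + 1 = k := by omega
    set t := (s.drop k).take (n - 1) with ht
    set oc := s[K]'hK with hoc
    set ic := s[K + n]'hKn with hic
    have F1 : (s.drop K).take n = oc :: t := by
      rw [List.drop_eq_getElem_cons hK, hk1']
      have : n = (n - 1) + 1 := by omega
      rw [this, List.take_succ_cons]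
    have F2 : (s.drop k).take n = t ++ [ic] := by
      have : n = (n - 1) + 1 := by omega
      rw [this, List.take_add_one, ht]
      congr 1
      rw [List.getElem?_drop]
      have hidx : k + (n - 1) = K + n := by omega
      rw [hidx, List.getElem?_eq_getElem hKn]
      rfl
    have hlt : (k : Int) < (s.length : Int) - (n : Int) + 1 := by omega
    rw [PySem.List.pyRange_one_cons hlt, List.foldl_cons, List.foldl_cons]
    rw [F1] at h3 h4
    have hocget : PySem.List.pyGetD s ((k:Int) - 1) ' ' = oc := by
      have h : (k:Int) - 1 = ((K : Nat) : Int) := by omega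
      rw [h, PySem.List.pyGetD_natCast, List.getD_eq_getElem _ _ hK]
    have hicget : PySem.List.pyGetD s ((k:Int) + (n:Int) - 1) ' ' = ic := by
      have h : (k:Int) + (n:Int) - 1 = ((K + n : Nat) : Int) := by omega
      rw [h, PySem.List.pyGetD_natCast, List.getD_eq_getElem _ _ hKn]
    have hp : PySem.List.slice s (some ((k:Nat):Int)) (some (((k:Nat):Int) + ((n:Nat):Int))) = t ++ [ic] := by
      rw [PySem.List.slice_natCast_add, F2]
    have hfreq1 : ∀ c, (freq.modify oc 0 (· - 1)).getD c 0 = ((t.count c : Int)) := by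
      intro c
      rw [PySem.Dict.getD_modify]
      by_cases hc : c = oc
      · rw [if_pos hc, h3 oc, hc]; simp
      · rw [if_neg hc, h3 c]; simp [Ne.symm hc]
    have hd1 : (if (freq.modify oc 0 (· - 1)).getD oc 0 == 0 then distinct - 1 else distinct)
        = ((PySem.Set.ofList t).length : Int) := by
      rw [hfreq1 oc, h4, pvDc_cons]
      by_cases hoc' : oc ∈ t
      · have hnz : t.count oc ≠ 0 := by simpa [List.count_eq_zero] using hoc'
        simp only [hoc', beq_iff_eq, Nat.cast_eq_zero]
        rw [if_neg hnz]; push_cast; ring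
      · have hz : t.count oc = 0 := by simp [List.count_eq_zero, hoc']
        simp only [hoc', hz, beq_iff_eq]
        norm_num
    have hd2 : (if (freq.modify oc 0 (· - 1)).getD ic 0 == 0
          then (if (freq.modify oc 0 (· - 1)).getD oc 0 == 0 then distinct - 1 else distinct) + 1
          else (if (freq.modify oc 0 (· - 1)).getD oc 0 == 0 then distinct - 1 else distinct))
        = ((PySem.Set.ofList (t ++ [ic])).length : Int) := by
      rw [hd1, hfreq1 ic, pvDc_append]
      by_cases hic' : ic ∈ t
      · have hnz : t.count ic ≠ 0 := by simpa [List.count_eq_zero] using hic'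
        simp only [hic', beq_iff_eq, Nat.cast_eq_zero]
        rw [if_neg hnz]; norm_num
      · have hz : t.count ic = 0 := by simp [List.count_eq_zero, hic']
        simp only [hic', hz, beq_iff_eq]
        norm_num
    have hfreq2 : ∀ c, ((freq.modify oc 0 (· - 1)).modify ic 0 (· + 1)).getD c 0
        = (((t ++ [ic]).count c : Int)) := by
      intro c
      rw [PySem.Dict.getD_modify]
      by_cases hc : c = ic
      · rw [if_pos hc, hfreq1 ic, hc]; simp
      · rw [if_neg hc, hfreq1 c]; simp [List.count_append, Ne.symm hc]
    -- the one A-step and B-step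
    have hkpos : ((k:Nat):Int) > 0 := by positivity
    have hih := ih (k + 1)
    have harg1 : ((k:Int) + 1) = (((k+1 : Nat)):Int) := by push_cast; ring
    have harg2 : (s.drop ((k+1) - 1)).take n = t ++ [ic] := by
      simpa using F2
    have hkpos' : (0:Int) < ((k:Nat):Int) := by positivity
    have hihapp := fun seen' out' => hih ((freq.modify oc 0 (· - 1)).modify ic 0 (· + 1))
        ((PySem.Set.ofList (t ++ [ic])).length : Int) seen' out' (by omega)
        (by push_cast at hk ⊢; omega)
        (fun c => by rw [harg2]; exact hfreq2 c) (by rw [harg2])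
    have hB0 : pvBStep s n ((freq, distinct), seen, out) ((k:Nat):Int)
        = (if (((PySem.Set.ofList (t ++ [ic])).length : Int) == (n:Int)) then
             if !(PySem.Set.contains seen (t ++ [ic])) then
               (((freq.modify oc 0 (· - 1)).modify ic 0 (· + 1),
                 ((PySem.Set.ofList (t ++ [ic])).length : Int)),
                PySem.Set.add seen (t ++ [ic]), out ++ [String.ofList (t ++ [ic])])
             else (((freq.modify oc 0 (· - 1)).modify ic 0 (· + 1),
                 ((PySem.Set.ofList (t ++ [ic])).length : Int)), seen, out)
           else (((freq.modify oc 0 (· - 1)).modify ic 0 (· + 1),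
                 ((PySem.Set.ofList (t ++ [ic])).length : Int)), seen, out)) := by
      simp only [pvBStep, hocget, hicget, hp, gt_iff_lt]
      rw [if_pos hkpos']
      simp only []
      rw [hd2]
    by_cases hc1 : (PySem.Set.ofList (t ++ [ic])).length = n
    · have hcast : (((PySem.Set.ofList (t ++ [ic])).length : Int) == (n:Int)) = true := by
        simp [hc1]
      have hbeq : ((PySem.Set.ofList (t ++ [ic])).length == n) = true := by simp [hc1]
      by_cases hc2 : (t ++ [ic]) ∈ seen
      · have hcon : seen.contains (t ++ [ic]) = true := by simpa using hc2
        have hA : pvAStep s n (seen, out) ((k:Nat):Int) = (seen, out) := by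
          simp only [pvAStep, hp, hbeq, Bool.true_and, hcon, Bool.not_true]
          rfl
        have hB : pvBStep s n ((freq, distinct), seen, out) ((k:Nat):Int)
            = (((freq.modify oc 0 (· - 1)).modify ic 0 (· + 1),
                ((PySem.Set.ofList (t ++ [ic])).length : Int)), seen, out) := by
          rw [hB0, if_pos hcast]
          simp only [PySem.Set.contains, hcon, Bool.not_true]
          rfl
        rw [hA, hB, harg1]
        exact hihapp seen out
      · have hcon : seen.contains (t ++ [ic]) = false := by simpa using hc2
        have hA : pvAStep s n (seen, out) ((k:Nat):Int)
            = (seen ++ [t ++ [ic]], out ++ [String.ofList (t ++ [ic])]) := by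
          simp only [pvAStep, hp, hbeq, Bool.true_and, hcon, Bool.not_false]
          rfl
        have hB : pvBStep s n ((freq, distinct), seen, out) ((k:Nat):Int)
            = (((freq.modify oc 0 (· - 1)).modify ic 0 (· + 1),
                ((PySem.Set.ofList (t ++ [ic])).length : Int)),
               seen ++ [t ++ [ic]], out ++ [String.ofList (t ++ [ic])]) := by
          rw [hB0, if_pos hcast]
          simp only [PySem.Set.contains, hcon, Bool.not_false]
          simp only [if_true]
          rw [PySem.Set.add_of_not_mem hc2]
        rw [hA, hB, harg1]
        exact hihapp (seen ++ [t ++ [ic]]) (out ++ [String.ofList (t ++ [ic])])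
    · have hcast : (((PySem.Set.ofList (t ++ [ic])).length : Int) == (n:Int)) = false := by
        simp [hc1]
      have hbeq : ((PySem.Set.ofList (t ++ [ic])).length == n) = false := by simp [hc1]
      have hA : pvAStep s n (seen, out) ((k:Nat):Int) = (seen, out) := by
        simp only [pvAStep, hp, hbeq, Bool.false_and]
        rfl
      have hB : pvBStep s n ((freq, distinct), seen, out) ((k:Nat):Int)
          = (((freq.modify oc 0 (· - 1)).modify ic 0 (· + 1),
              ((PySem.Set.ofList (t ++ [ic])).length : Int)), seen, out) := by
        rw [hB0, if_neg (by simp [hc1])]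
      rw [hA, hB, harg1]
      exact hihapp seen out

-- ===== VERDICT (by name: the statement is the Claim_ definition above) =====
theorem iterate_perms_spec : Claim_equal_iterate_perms := by
  unfold Claim_equal_iterate_perms Spec_iterate_perms
  intro superperm _
  unfold iterate_perms iterate_perms_alt
  simp only []
  set s := superperm.toList with hs
  set n := (PySem.Set.ofList s).length with hndef
  by_cases h1 : n = 1
  · simp [h1]
  · have hbeq1 : (n == 1) = false := by simp [h1]
    rw [hbeq1]
    simp only [Bool.false_eq_true, if_false]
    have hnle : n ≤ s.length := PySem.Set.length_ofList_le s
    have hnpos : s ≠ [] → 1 ≤ n := by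
      intro hne
      match s, hne with
      | c :: l, _ => rw [hndef]; rw [PySem.Set.ofList_cons]; simp
    have hb1 : (0:Int) < (s.length : Int) - (n : Int) + 1 := by omega
    rw [PySem.List.pyRange_one_cons hb1, List.foldl_cons, List.foldl_cons]
    -- initialisation invariant
    have hInit := pvInit_inv (s.take n) [] PySem.Dict.empty 0
      (fun c => by simp [PySem.Dict.getD_empty]) (by simp [PySem.Set.ofList_nil])
    simp only [List.nil_append] at hInit
    obtain ⟨hIfreq, hIdist⟩ := hInit
    -- the window at index 0
    have hp0 : PySem.List.slice s (some (0:Int)) (some ((0:Int) + ((n:Nat):Int))) = s.take n := by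
      rw [zero_add, PySem.List.slice_zero_start, PySem.List.slice_to_natCast]
    set init := (s.take n).foldl pvBInit (PySem.Dict.empty, (0:Int)) with hinit
    have hB0 : pvBStep s n (init, PySem.Set.empty, []) (0:Int)
        = (if (((PySem.Set.ofList (s.take n)).length : Int) == (n:Int)) then
             (init, PySem.Set.add PySem.Set.empty (s.take n), [String.ofList (s.take n)])
           else (init, PySem.Set.empty, [])) := by
      simp only [pvBStep, hp0]
      rw [if_neg (lt_irrefl (0:Int))]
      rw [hIdist]
      by_cases hc : (((PySem.Set.ofList (s.take n)).length : Int) == (n:Int)) = true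
      · rw [if_pos hc, if_pos hc]
        simp
      · rw [if_neg hc, if_neg hc]
    have hA0 : pvAStep s n (([] : List (List Char)), ([] : List String)) (0:Int)
        = (if ((PySem.Set.ofList (s.take n)).length == n) then
             ([s.take n], [String.ofList (s.take n)])
           else ([], [])) := by
      simp only [pvAStep, hp0]
      by_cases hc : ((PySem.Set.ofList (s.take n)).length == n) = true
      · rw [if_pos hc]
        simp [hc]
      · rw [if_neg hc]
        simp only [hc, Bool.false_and, Bool.false_eq_true, if_false]
    have hone : (0:Int) + 1 = ((1:Nat):Int) := by norm_num
    have hloop := pvLoop_eq s n hnpos (s.length - n) 1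
    have hcast2 : ((1:Nat):Int) + ((s.length - n : Nat):Int) = (s.length : Int) - (n:Int) + 1 := by
      push_cast [Nat.cast_sub hnle]; ring
    have hdrop0 : (s.drop (1-1)).take n = s.take n := by simp
    rw [hA0, hB0, hone]
    by_cases hc : (PySem.Set.ofList (s.take n)).length = n
    · rw [if_pos (by simp [hc]), if_pos (by simp [hc])]
      exact hloop init.1 init.2 [s.take n] [String.ofList (s.take n)] (le_refl 1) hcast2
        (fun c => by rw [hdrop0]; exact hIfreq c) (by rw [hdrop0]; exact hIdist)
    · rw [if_neg (by simp [hc]), if_neg (by simp [hc])]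
      exact hloop init.1 init.2 [] [] (le_refl 1) hcast2
        (fun c => by rw [hdrop0]; exact hIfreq c) (by rw [hdrop0]; exact hIdist)
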